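-- pv_equiv track=rewrite | github.com/bssrdf/pyleet | M/MinimumNumberofOperationstoMakeAllArrayElementsEqualto1.py | minOperations2
-- ===== SOURCE A (Python) =====
-- from typing import List
-- from math import gcd, inf
-- from collections import deque,Counter
--
-- def minOperations2(nums: List[int]) -> int:
--     n = len(nums)
--     ones = Counter(nums)
--     if ones[1] > 0: return n - ones[1]
--     ans = inf
--     for i in range(n):
--         g = nums[i]
--         for j in range(i, n):
--             g = gcd(g, nums[j])
--             if g == 1:
--                 ans = min(ans, j-i+n-1)
--     return ans if ans != inf else -1
-- ===== SOURCE B (Python) =====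
-- from math import gcd
--
-- def minOperations2(nums):
--     n = len(nums)
--     c1 = nums.count(1)
--     if c1 > 0:
--         return n - c1
--     best = -1  # minimal length of a subarray with gcd 1, -1 if none
--     prev = []  # (g, s): distinct gcds of subarrays ending at the previous index,
--                # s = largest start index achieving g; kept in decreasing s order
--     for j in range(n):
--         x = nums[j]
--         cur = [(gcd(x, x), j)]
--         for g, s in prev:
--             ng = gcd(g, x)
--             if all(ng != h for h, _ in cur):
--                 cur.append((ng, s))
--         prev = cur
--         for g, s in cur:
--             if g == 1:
--                 length = j - s + 1
--                 if best == -1 or length < best: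
--                     best = length
--     return best + n - 2 if best != -1 else -1
-- ===== Notes on version B (the rewrite author's own statement) =====
-- stated objective: faster
-- what changed: B replaces A's scan of all O(n^2) subarray starts (recomputing running gcds per start) by a single left-to-right pass that maintains, per end index, the list of distinct gcds of subarrays ending there together with the largest start index achieving each gcd, so only O(log M) candidates are touched per position.
import Mathlib
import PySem

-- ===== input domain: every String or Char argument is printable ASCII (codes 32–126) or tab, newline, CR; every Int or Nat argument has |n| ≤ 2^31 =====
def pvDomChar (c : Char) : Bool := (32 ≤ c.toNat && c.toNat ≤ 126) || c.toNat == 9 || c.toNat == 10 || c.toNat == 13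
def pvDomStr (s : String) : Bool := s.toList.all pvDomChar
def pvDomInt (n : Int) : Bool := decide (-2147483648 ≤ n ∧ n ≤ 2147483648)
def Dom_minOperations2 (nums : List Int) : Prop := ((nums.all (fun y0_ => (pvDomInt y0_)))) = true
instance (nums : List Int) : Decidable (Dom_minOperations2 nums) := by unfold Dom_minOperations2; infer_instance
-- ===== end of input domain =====

-- B replaces A's O(n^2) scan over all subarrays by the standard per-end-index list of distinct
-- running gcds (each paired with the largest start achieving it), which is asymptotically faster.

-- math.gcd for two ints: gcd of absolute values, nonnegative result (exact port)
def pyGcd (a b : Int) : Int := Int.gcd a b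

-- ===== PORT A =====
-- the inner `for j in range(i, n)` loop body of A
def innerA (nums : List Int) (n i : Int) (st : Int × Option Int) (j : Int) : Int × Option Int :=
  let g := pyGcd st.1 (PySem.List.pyGetD nums j 0)
  if g = 1 then
    let v : Int := j - i + n - 1
    (g, some (match st.2 with | none => v | some a => min a v))
  else (g, st.2)

-- the outer `for i in range(n)` loop body of A
def outerA (nums : List Int) (n : Int) (ans : Option Int) (i : Int) : Option Int :=
  ((PySem.List.pyRange i n 1).foldl (innerA nums n i) (PySem.List.pyGetD nums i 0, ans)).2

def minOperations2 (nums : List Int) : Int :=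
  let n : Int := nums.length
  let ones : PySem.Dict Int Int := PySem.Dict.counter nums
  if ones.getD 1 0 > 0 then n - ones.getD 1 0
  else
    let ans : Option Int := (PySem.List.pyRange 0 n 1).foldl (outerA nums n) none
    match ans with
    | none => -1
    | some a => a

-- ===== PORT B =====
-- one step of `for g, s in prev: ...` building the new gcd list
def bstepP (x : Int) (cur : List (Int × Int)) (p : Int × Int) : List (Int × Int) :=
  let ng := pyGcd p.1 x
  if cur.all (fun q => decide (ng ≠ q.1)) then cur ++ [(ng, p.2)] else cur

-- one step of `for g, s in cur: ...` updating best
def bupdP (j : Int) (best : Int) (q : Int × Int) : Int :=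
  if q.1 = 1 then
    let len := j - q.2 + 1
    if best = -1 ∨ len < best then len else best
  else best

-- the `for j in range(n)` loop body of B
def bodyBP (nums : List Int) (st : List (Int × Int) × Int) (j : Int) : List (Int × Int) × Int :=
  let x := PySem.List.pyGetD nums j 0
  let cur := st.1.foldl (bstepP x) [(pyGcd x x, j)]
  (cur, cur.foldl (bupdP j) st.2)

def minOperations2_alt (nums : List Int) : Int :=
  let n : Int := nums.length
  let c1 : Int := PySem.List.count nums 1
  if c1 > 0 then n - c1
  else
    let res : List (Int × Int) × Int := (PySem.List.pyRange 0 n 1).foldl (bodyBP nums) ([], -1)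
    if res.2 ≠ -1 then res.2 + n - 2 else -1

-- ===== PRECONDITION & SPEC =====
def Spec_minOperations2 (nums : List Int) (out : Int) : Prop := out = minOperations2_alt nums
instance (nums : List Int) (out : Int) : Decidable (Spec_minOperations2 nums out) := by unfold Spec_minOperations2; infer_instance

-- ===== CLAIM (what is proved, stated in full; the proofs are below) =====
def Claim_equal_minOperations2 : Prop := ∀ (nums : List Int), Dom_minOperations2 nums → Spec_minOperations2 nums (minOperations2 nums)

-- ===== LEMMAS AND PROOFS =====

-- gcd of the segment nums[i..j] (both inclusive), seeded with 0 as Python's running fold does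
def segGcd (nums : List Int) (i j : Nat) : Int := ((nums.drop i).take (j + 1 - i)).foldl pyGcd 0

-- Python's `min(ans, v)` with ans possibly inf (none)
def omin : Option Int → Int → Option Int
  | none, v => some v
  | some a, v => some (min a v)

-- B's best accumulator viewed as an Option (-1 = none)
def bOpt (b : Int) : Option Int := if b = -1 then none else some b

-- r is the minimum of (the value of a, if any) and the set P
def pvIsMin (r a : Option Int) (P : Int → Prop) : Prop :=
  (r = a ∨ ∃ v, P v ∧ r = some v) ∧
  (∀ v, P v → ∃ b, r = some b ∧ b ≤ v) ∧
  (∀ x, a = some x → ∃ b, r = some b ∧ b ≤ x)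

-- Nat-indexed forms of the two loops (the ports' pyRange folds reduce to these)
def fInner (nums : List Int) (i : Nat) (st : Int × Option Int) (j : Nat) : Int × Option Int :=
  let g := pyGcd st.1 (nums.getD j 0)
  if g = 1 then (g, omin st.2 ((j : Int) - (i : Int) + (nums.length : Int) - 1)) else (g, st.2)

def bodyA (nums : List Int) (ans : Option Int) (i : Nat) : Option Int :=
  ((List.range (nums.length - i)).foldl (fun st k => fInner nums i st (i + k)) (nums.getD i 0, ans)).2

def ansA (nums : List Int) : Option Int := (List.range nums.length).foldl (bodyA nums) none

def bstep (x : Int) (cur : List (Int × Int)) (p : Int × Int) : List (Int × Int) :=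
  if cur.all (fun q => decide (pyGcd p.1 x ≠ q.1)) then cur ++ [(pyGcd p.1 x, p.2)] else cur

def bupd (J : Int) (best : Int) (q : Int × Int) : Int :=
  if q.1 = 1 then (if best = -1 ∨ J - q.2 + 1 < best then J - q.2 + 1 else best) else best

def bodyB (nums : List Int) (st : List (Int × Int) × Int) (j : Nat) : List (Int × Int) × Int :=
  let x := nums.getD j 0
  let cur := st.1.foldl (bstep x) [(pyGcd x x, (j : Int))]
  (cur, cur.foldl (bupd (j : Int)) st.2)

def stB (nums : List Int) (m : Nat) : List (Int × Int) × Int := (List.range m).foldl (bodyB nums) ([], -1)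

-- invariant of B's gcd list after processing index j
def pvInv (nums : List Int) (j : Nat) (prev : List (Int × Int)) : Prop :=
  (∀ p ∈ prev, ∃ s : Nat, p.2 = (s : Int) ∧ s ≤ j ∧ segGcd nums s j = p.1 ∧
      ∀ i, i ≤ j → segGcd nums i j = p.1 → i ≤ s) ∧
  (∀ i, i ≤ j → ∃ p ∈ prev, p.1 = segGcd nums i j) ∧
  prev.Pairwise (fun a b => b.2 < a.2)

theorem pyGcd_self (a : Int) : pyGcd a a = pyGcd 0 a := by
  simp [pyGcd, Int.gcd]

theorem segGcd_base (nums : List Int) (i : Nat) (h : i < nums.length) :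
    segGcd nums i i = pyGcd 0 (nums.getD i 0) := by
  unfold segGcd
  have h1 : i + 1 - i = 1 := by omega
  rw [h1, List.take_one]
  simp [List.head?_drop, List.getElem?_eq_getElem h, List.getD]

theorem segGcd_succ (nums : List Int) (i j : Nat) (hij : i ≤ j) (hj : j + 1 < nums.length) :
    segGcd nums i (j + 1) = pyGcd (segGcd nums i j) (nums.getD (j + 1) 0) := by
  unfold segGcd
  have h1 : j + 1 + 1 - i = (j + 1 - i) + 1 := by omega
  rw [h1, List.take_succ, List.foldl_append]
  have h2 : (nums.drop i)[j + 1 - i]? = some nums[j + 1] := by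
    rw [List.getElem?_drop]
    have : i + (j + 1 - i) = j + 1 := by omega
    rw [this, List.getElem?_eq_getElem hj]
  rw [h2]
  simp [List.getD, List.getElem?_eq_getElem hj]

theorem IsMin_empty (a : Option Int) (P : Int → Prop) (h : ∀ v, ¬ P v) : pvIsMin a a P := by
  refine ⟨Or.inl rfl, fun v hv => absurd hv (h v), fun x hx => ⟨x, hx, le_refl x⟩⟩

theorem IsMin_congr {r a : Option Int} {P Q : Int → Prop} (h : ∀ v, P v ↔ Q v)
    (hm : pvIsMin r a P) : pvIsMin r a Q := by
  obtain ⟨h1, h2, h3⟩ := hm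
  refine ⟨?_, fun v hv => h2 v ((h v).mpr hv), h3⟩
  rcases h1 with h1 | ⟨v, hv, hr⟩
  · exact Or.inl h1
  · exact Or.inr ⟨v, (h v).mp hv, hr⟩

theorem IsMin_trans {r1 r2 a : Option Int} {P Q : Int → Prop}
    (h1 : pvIsMin r1 a P) (h2 : pvIsMin r2 r1 Q) : pvIsMin r2 a (fun v => P v ∨ Q v) := by
  obtain ⟨a1, b1, c1⟩ := h1
  obtain ⟨a2, b2, c2⟩ := h2
  refine ⟨?_, ?_, ?_⟩
  · rcases a2 with rfl | ⟨v, hv, hr⟩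
    · rcases a1 with rfl | ⟨v, hv, hr⟩
      · exact Or.inl rfl
      · exact Or.inr ⟨v, Or.inl hv, hr⟩
    · exact Or.inr ⟨v, Or.inr hv, hr⟩
  · rintro v (hv | hv)
    · obtain ⟨b, hb, hle⟩ := b1 v hv
      obtain ⟨c, hc, hle2⟩ := c2 b hb
      exact ⟨c, hc, le_trans hle2 hle⟩
    · exact b2 v hv
  · intro x hx
    obtain ⟨b, hb, hle⟩ := c1 x hx
    obtain ⟨c, hc, hle2⟩ := c2 b hb
    exact ⟨c, hc, le_trans hle2 hle⟩

theorem IsMin_omin (a : Option Int) (v : Int) : pvIsMin (omin a v) a (fun w => w = v) := by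
  unfold pvIsMin
  cases a with
  | none =>
      refine ⟨Or.inr ⟨v, rfl, rfl⟩, ?_, by simp⟩
      intro w hw
      exact ⟨v, rfl, le_of_eq hw.symm⟩
  | some x =>
      refine ⟨?_, ?_, ?_⟩
      · rcases le_total x v with h | h
        · exact Or.inl (by simp [omin, min_eq_left h])
        · exact Or.inr ⟨v, rfl, by simp [omin, min_eq_right h]⟩
      · intro w hw
        exact ⟨min x v, rfl, hw ▸ min_le_right x v⟩
      · rintro y hy
        cases hy
        exact ⟨min x v, rfl, min_le_left x v⟩

theorem IsMin_subsume {r a : Option Int} {P Q : Int → Prop}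
    (hm : pvIsMin r a P) (h1 : ∀ v, P v → Q v) (h2 : ∀ v, Q v → ∃ w, P w ∧ w ≤ v) :
    pvIsMin r a Q := by
  obtain ⟨ha, hb, hc⟩ := hm
  refine ⟨?_, ?_, hc⟩
  · rcases ha with rfl | ⟨v, hv, hr⟩
    · exact Or.inl rfl
    · exact Or.inr ⟨v, h1 v hv, hr⟩
  · intro v hv
    obtain ⟨w, hw, hle⟩ := h2 v hv
    obtain ⟨b, hb', hle2⟩ := hb w hw
    exact ⟨b, hb', le_trans hle2 hle⟩

-- the two loop bodies agree once indices are Nat-cast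
theorem innerA_eq_fInner (nums : List Int) (k t : Nat) (st : Int × Option Int) :
    innerA nums (nums.length : Int) (k : Int) st ((k : Int) + (t : Int)) = fInner nums k st (k + t) := by
  rcases st with ⟨g0, a0⟩
  have hcast : (k : Int) + (t : Int) = ((k + t : Nat) : Int) := by push_cast; ring
  rw [innerA, hcast, PySem.List.pyGetD_natCast]
  cases a0 <;> simp [fInner, omin] <;> intro _ <;> push_cast <;> ring

theorem outerA_eq_bodyA (nums : List Int) (ans : Option Int) (k : Nat) (hk : k < nums.length) :
    outerA nums (nums.length : Int) ans ((0 : Int) + (k : Int)) = bodyA nums ans k := by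
  rw [outerA, bodyA, zero_add, PySem.List.pyRange_one, List.foldl_map, PySem.List.pyGetD_natCast]
  have hN : ((nums.length : Int) - (k : Int)).toNat = nums.length - k := by omega
  rw [hN]
  refine congrArg Prod.snd ?_
  refine PySem.List.foldl_congr_mem _ _ _ _ ?_
  intro st t ht
  exact innerA_eq_fInner nums k t st

-- bridging: port A equals the Nat-indexed loop
theorem portA_eq (nums : List Int) (h : ¬ ((PySem.Dict.counter nums).getD 1 0 > 0)) :
    minOperations2 nums = match ansA nums with | none => -1 | some a => a := by
  simp only [minOperations2]
  rw [if_neg h, PySem.List.pyRange_one, List.foldl_map]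
  have hN : ((nums.length : Int) - 0).toNat = nums.length := by omega
  rw [hN]
  have hfold : (List.range nums.length).foldl
      (fun ans (k : Nat) => outerA nums (nums.length : Int) ans ((0 : Int) + (k : Int))) none
      = ansA nums := by
    refine PySem.List.foldl_congr_mem _ _ _ _ ?_
    intro ans k hk
    exact outerA_eq_bodyA nums ans k (List.mem_range.mp hk)
  rw [hfold]

theorem bstepP_eq : @bstepP = @bstep := rfl

theorem bupdP_eq : @bupdP = @bupd := rfl

theorem bodyBP_eq_bodyB (nums : List Int) (st : List (Int × Int) × Int) (k : Nat) :
    bodyBP nums st ((0 : Int) + (k : Int)) = bodyB nums st k := by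
  rw [bodyBP, bodyB, zero_add, PySem.List.pyGetD_natCast, bstepP_eq, bupdP_eq]

-- bridging: port B equals the Nat-indexed loop
theorem portB_eq (nums : List Int) (h : ¬ ((PySem.List.count nums 1 : Int) > 0)) :
    minOperations2_alt nums =
      if (stB nums nums.length).2 ≠ -1 then (stB nums nums.length).2 + (nums.length : Int) - 2
      else -1 := by
  simp only [minOperations2_alt]
  rw [if_neg h, PySem.List.pyRange_one, List.foldl_map]
  have hN : ((nums.length : Int) - 0).toNat = nums.length := by omega
  rw [hN]
  have hfold : (List.range nums.length).foldl
      (fun st (k : Nat) => bodyBP nums st ((0 : Int) + (k : Int))) ([], -1)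
      = stB nums nums.length := by
    refine PySem.List.foldl_congr_mem _ _ _ _ ?_
    intro st k _
    exact bodyBP_eq_bodyB nums st k
  rw [hfold]

-- characterization of A's inner loop
theorem innerA_char (nums : List Int) (i : Nat) (hi : i < nums.length) :
    ∀ m, 1 ≤ m → i + m ≤ nums.length → ∀ ans0 : Option Int,
      (((List.range m).foldl (fun st k => fInner nums i st (i + k)) (nums.getD i 0, ans0)).1
        = segGcd nums i (i + m - 1)) ∧
      pvIsMin (((List.range m).foldl (fun st k => fInner nums i st (i + k)) (nums.getD i 0, ans0)).2)
        ans0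
        (fun v => ∃ j, i ≤ j ∧ j < i + m ∧ segGcd nums i j = 1 ∧
          v = (j : Int) - i + nums.length - 1) := by
  intro m
  induction m with
  | zero => omega
  | succ m ih =>
      intro _ hmn ans0
      by_cases hm : m = 0
      · subst hm
        have hseg : pyGcd (nums.getD i 0) (nums.getD i 0) = segGcd nums i i := by
          rw [segGcd_base nums i hi, pyGcd_self]
        have hred : (List.range (0 + 1)).foldl (fun st k => fInner nums i st (i + k))
            (nums.getD i 0, ans0) = fInner nums i (nums.getD i 0, ans0) (i + 0) := by
          simp [List.range_succ]
        rw [hred]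
        unfold fInner
        dsimp only
        simp only [Nat.add_zero, Nat.add_sub_cancel]
        rw [hseg]
        by_cases hg : segGcd nums i i = 1
        · rw [if_pos hg]
          refine ⟨rfl, ?_⟩
          refine IsMin_congr ?_ (IsMin_omin ans0 _)
          intro v
          constructor
          · rintro rfl
            exact ⟨i, le_refl i, by omega, hg, rfl⟩
          · rintro ⟨j, hij, hji, hsj, rfl⟩
            have : j = i := by omega
            subst this
            rfl
        · rw [if_neg hg]
          refine ⟨rfl, ?_⟩
          refine IsMin_empty _ _ ?_
          rintro v ⟨j, hij, hji, hsj, rfl⟩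
          have : j = i := by omega
          subst this
          exact hg hsj
      · have hm1 : 1 ≤ m := by omega
        obtain ⟨ihg, ihm⟩ := ih hm1 (by omega) ans0
        rw [List.range_succ, List.foldl_append, List.foldl_cons, List.foldl_nil]
        set stm := (List.range m).foldl (fun st k => fInner nums i st (i + k)) (nums.getD i 0, ans0)
          with hstm
        have h1 : i + m - 1 + 1 = i + m := by omega
        have hsegstep : pyGcd stm.1 (nums.getD (i + m) 0) = segGcd nums i (i + m) := by
          rw [ihg]
          conv_rhs => rw [← h1]
          rw [segGcd_succ nums i (i + m - 1) (by omega) (by omega), h1]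
        unfold fInner
        rw [hsegstep]
        by_cases hg : segGcd nums i (i + m) = 1
        · rw [if_pos hg]
          refine ⟨by simpa using hg, ?_⟩
          simp only []
          have hstep : pvIsMin (omin stm.2 ((i + m : Nat) - (i : Int) + nums.length - 1)) stm.2
              (fun w => w = (i + m : Nat) - (i : Int) + nums.length - 1) := IsMin_omin _ _
          have := IsMin_trans ihm hstep
          refine IsMin_congr ?_ this
          intro v
          constructor
          · rintro (⟨j, hij, hji, hsj, rfl⟩ | hv)
            · exact ⟨j, hij, by omega, hsj, rfl⟩
            · exact ⟨i + m, by omega, by omega, hg, by rw [hv]⟩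
          · rintro ⟨j, hij, hji, hsj, rfl⟩
            by_cases hj : j < i + m
            · exact Or.inl ⟨j, hij, hj, hsj, rfl⟩
            · have : j = i + m := by omega
              subst this
              exact Or.inr rfl
        · rw [if_neg hg]
          refine ⟨by simpa using hg, ?_⟩
          refine IsMin_congr ?_ ihm
          intro v
          constructor
          · rintro ⟨j, hij, hji, hsj, rfl⟩
            exact ⟨j, hij, by omega, hsj, rfl⟩
          · rintro ⟨j, hij, hji, hsj, rfl⟩
            by_cases hj : j < i + m
            · exact ⟨j, hij, hj, hsj, rfl⟩
            · have : j = i + m := by omega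
              subst this
              exact absurd hsj hg

-- characterization of A's outer loop
theorem ansA_char (nums : List Int) : ∀ m, m ≤ nums.length →
    pvIsMin ((List.range m).foldl (bodyA nums) none) none
      (fun v => ∃ i j, i < m ∧ i ≤ j ∧ j < nums.length ∧ segGcd nums i j = 1 ∧
        v = (j : Int) - i + nums.length - 1) := by
  intro m
  induction m with
  | zero =>
      intro _
      refine IsMin_empty _ _ ?_
      rintro v ⟨i, j, hi, _⟩
      omega
  | succ m ih =>
      intro hmn
      have hm : m < nums.length := by omega
      rw [List.range_succ, List.foldl_append, List.foldl_cons, List.foldl_nil]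
      have hinner := (innerA_char nums m hm (nums.length - m) (by omega) (by omega)
        ((List.range m).foldl (bodyA nums) none)).2
      have hbody : bodyA nums ((List.range m).foldl (bodyA nums) none) m
          = ((List.range (nums.length - m)).foldl (fun st k => fInner nums m st (m + k))
              (nums.getD m 0, (List.range m).foldl (bodyA nums) none)).2 := rfl
      rw [hbody]
      have := IsMin_trans (ih (by omega)) hinner
      refine IsMin_congr ?_ this
      intro v
      constructor
      · rintro (⟨i, j, hi, hij, hj, hs, rfl⟩ | ⟨j, hij, hj, hs, rfl⟩)
        · exact ⟨i, j, by omega, hij, hj, hs, rfl⟩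
        · exact ⟨m, j, by omega, hij, by omega, hs, rfl⟩
      · rintro ⟨i, j, hi, hij, hj, hs, rfl⟩
        by_cases him : i < m
        · exact Or.inl ⟨i, j, him, hij, hj, hs, rfl⟩
        · have : i = m := by omega
          subst this
          exact Or.inr ⟨j, hij, by omega, hs, rfl⟩

-- the gcd-list build step of B
theorem build_char (x : Int) : ∀ (rest cur : List (Int × Int)),
    rest.Pairwise (fun a b => b.2 < a.2) →
    (∀ p ∈ rest, ∀ q ∈ cur, p.2 < q.2) →
    cur.Pairwise (fun a b => b.2 < a.2) →
    (∃ ext, rest.foldl (bstep x) cur = cur ++ ext ∧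
        ∀ q ∈ ext, ∃ p ∈ rest, q = (pyGcd p.1 x, p.2)) ∧
    (rest.foldl (bstep x) cur).Pairwise (fun a b => b.2 < a.2) ∧
    (∀ p ∈ rest, ∃ q ∈ rest.foldl (bstep x) cur, q.1 = pyGcd p.1 x) ∧
    (∀ q ∈ rest.foldl (bstep x) cur, q ∉ cur →
      ∃ p ∈ rest, q = (pyGcd p.1 x, p.2) ∧
        (∀ p' ∈ rest, pyGcd p'.1 x = q.1 → p'.2 ≤ q.2) ∧
        (∀ q' ∈ cur, q'.1 ≠ q.1)) := by
  intro rest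
  induction rest with
  | nil =>
      intro cur _ _ hcur
      refine ⟨⟨[], by simp, by simp⟩, by simpa using hcur, by simp, ?_⟩
      intro q hq hnq
      exact absurd (by simpa using hq) hnq
  | cons p rest ih =>
      intro cur hsort hlt hcur
      obtain ⟨hhead, htail⟩ := List.pairwise_cons.mp hsort
      rw [List.foldl_cons]
      by_cases hall : cur.all (fun q => decide (pyGcd p.1 x ≠ q.1)) = true
      · -- the new gcd is not yet present: it is appended
        have hb : bstep x cur p = cur ++ [(pyGcd p.1 x, p.2)] := by
          simp only [bstep, if_pos hall]
        have hnotin : ∀ q' ∈ cur, pyGcd p.1 x ≠ q'.1 := by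
          intro q' hq'
          have := List.all_eq_true.mp hall q' hq'
          simpa using this
        rw [hb]
        have hlt' : ∀ p' ∈ rest, ∀ q ∈ cur ++ [(pyGcd p.1 x, p.2)], p'.2 < q.2 := by
          intro p' hp' q hq
          rcases List.mem_append.mp hq with hq | hq
          · exact hlt p' (List.mem_cons_of_mem _ hp') q hq
          · simp only [List.mem_singleton] at hq
            subst hq
            exact hhead p' hp'
        have hcur' : (cur ++ [(pyGcd p.1 x, p.2)]).Pairwise (fun a b => b.2 < a.2) := by
          rw [List.pairwise_append]
          refine ⟨hcur, by simp, ?_⟩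
          intro a ha b hb'
          simp only [List.mem_singleton] at hb'
          subst hb'
          exact hlt p List.mem_cons_self a ha
        obtain ⟨⟨ext, hext, hsrc⟩, hpair, hkeys, hfirst⟩ := ih (cur ++ [(pyGcd p.1 x, p.2)]) htail hlt' hcur'
        refine ⟨⟨(pyGcd p.1 x, p.2) :: ext, by rw [hext]; simp, ?_⟩, hpair, ?_, ?_⟩
        · intro q hq0
          rcases List.mem_cons.mp hq0 with rfl | hq
          · exact ⟨p, List.mem_cons_self, rfl⟩
          · obtain ⟨p1, hp1, hq1⟩ := hsrc q hq
            exact ⟨p1, List.mem_cons_of_mem _ hp1, hq1⟩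
        · intro p' hp'
          rcases List.mem_cons.mp hp' with rfl | hp'
          · refine ⟨(pyGcd p'.1 x, p'.2), ?_, rfl⟩
            rw [hext]
            exact List.mem_append_left _ (List.mem_append_right _ (List.mem_singleton.mpr rfl))
          · exact hkeys p' hp'
        · intro q hq hnq
          by_cases hq' : q ∈ cur ++ [(pyGcd p.1 x, p.2)]
          · have hqeq : q = (pyGcd p.1 x, p.2) := by
              rcases List.mem_append.mp hq' with h | h
              · exact absurd h hnq
              · simpa using h
            subst hqeq
            refine ⟨p, List.mem_cons_self, rfl, ?_, ?_⟩
            · intro p' hp' hk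
              rcases List.mem_cons.mp hp' with rfl | hp'
              · exact le_refl _
              · exact le_of_lt (hhead p' hp')
            · intro q' hq'c h
              exact (hnotin q' hq'c) h.symm
          · obtain ⟨p1, hp1, heq, hmax, hnc⟩ := hfirst q hq hq'
            refine ⟨p1, List.mem_cons_of_mem _ hp1, heq, ?_, ?_⟩
            · intro p' hp' hkey
              rcases List.mem_cons.mp hp' with rfl | hp'
              · exact absurd hkey
                  (fun h => hnc (pyGcd p'.1 x, p'.2)
                    (List.mem_append_right _ (List.mem_singleton.mpr rfl)) h)
              · exact hmax p' hp' hkey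
            · intro q' hq'c
              exact hnc q' (List.mem_append_left _ hq'c)
      · -- the new gcd is already present: nothing is appended
        have hb : bstep x cur p = cur := by
          simp only [bstep, if_neg hall]
        have hin : ∃ q' ∈ cur, q'.1 = pyGcd p.1 x := by
          by_contra hcon
          push_neg at hcon
          exact hall (List.all_eq_true.mpr (fun q' hq' => by
            simpa using fun h => hcon q' hq' h.symm))
        rw [hb]
        obtain ⟨⟨ext, hext, hsrc⟩, hpair, hkeys, hfirst⟩ := ih cur htail
          (fun p' hp' => hlt p' (List.mem_cons_of_mem _ hp')) hcur
        refine ⟨⟨ext, hext, ?_⟩, hpair, ?_, ?_⟩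
        · intro q hq
          obtain ⟨p1, hp1, hq1⟩ := hsrc q hq
          exact ⟨p1, List.mem_cons_of_mem _ hp1, hq1⟩
        · intro p' hp'
          rcases List.mem_cons.mp hp' with rfl | hp'
          · obtain ⟨q', hq', hkey⟩ := hin
            refine ⟨q', ?_, hkey⟩
            rw [hext]
            exact List.mem_append_left _ hq'
          · exact hkeys p' hp'
        · intro q hq hnq
          obtain ⟨p1, hp1, heq, hmax, hnc⟩ := hfirst q hq hnq
          refine ⟨p1, List.mem_cons_of_mem _ hp1, heq, ?_, hnc⟩
          intro p' hp' hkey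
          rcases List.mem_cons.mp hp' with rfl | hp'
          · obtain ⟨q', hq', hkeyc⟩ := hin
            exact absurd (hkeyc.trans hkey) (hnc q' hq')
          · exact hmax p' hp' hkey

-- B's invariant is established and maintained
theorem pvInv_zero (nums : List Int) (h : 0 < nums.length) :
    pvInv nums 0 [(pyGcd (nums.getD 0 0) (nums.getD 0 0), (0 : Int))] := by
  have hseg : segGcd nums 0 0 = pyGcd (nums.getD 0 0) (nums.getD 0 0) := by
    rw [segGcd_base nums 0 h, pyGcd_self]
  refine ⟨?_, ?_, ?_⟩
  · intro p hp
    simp only [List.mem_singleton] at hp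
    subst hp
    exact ⟨0, rfl, le_refl 0, hseg.symm ▸ rfl, fun i hi _ => hi⟩
  · intro i hi
    interval_cases i
    exact ⟨_, List.mem_singleton.mpr rfl, hseg.symm⟩
  · simp

theorem pvInv_step (nums : List Int) (j : Nat) (prev : List (Int × Int))
    (hj : j + 1 < nums.length) (hinv : pvInv nums j prev) :
    pvInv nums (j + 1)
      (prev.foldl (bstep (nums.getD (j + 1) 0))
        [(pyGcd (nums.getD (j + 1) 0) (nums.getD (j + 1) 0), ((j + 1 : Nat) : Int))]) := by
  obtain ⟨hs, hcomp, hpair⟩ := hinv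
  set x := nums.getD (j + 1) 0 with hx
  set c0 : List (Int × Int) := [(pyGcd x x, ((j + 1 : Nat) : Int))] with hc0
  have hlt : ∀ p ∈ prev, ∀ q ∈ c0, p.2 < q.2 := by
    intro p hp q hq
    obtain ⟨sp, hp2, hple, _, _⟩ := hs p hp
    simp only [hc0, List.mem_singleton] at hq
    subst hq
    rw [hp2]
    push_cast
    omega
  have hcurp : c0.Pairwise (fun a b => b.2 < a.2) := by simp [hc0]
  obtain ⟨⟨ext, hext, hsrc⟩, hpair', hkeys, hfirst⟩ := build_char x prev c0 hpair hlt hcurp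
  have hheadg : segGcd nums (j + 1) (j + 1) = pyGcd x x := by
    rw [segGcd_base nums (j + 1) hj, pyGcd_self]
  have hheadmem : (pyGcd x x, ((j + 1 : Nat) : Int)) ∈ prev.foldl (bstep x) c0 := by
    rw [hext]
    exact List.mem_append_left _ (List.mem_singleton.mpr rfl)
  refine ⟨?_, ?_, hpair'⟩
  · -- soundness with maximality
    intro q hq
    by_cases hqc : q ∈ c0
    · simp only [hc0, List.mem_singleton] at hqc
      subst hqc
      exact ⟨j + 1, rfl, le_refl _, hheadg, fun i hi _ => hi⟩
    · obtain ⟨p, hp, heq, hmax, hnc⟩ := hfirst q hq hqc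
      obtain ⟨sp, hp2, hple, hseg, hmaxp⟩ := hs p hp
      refine ⟨sp, ?_, by omega, ?_, ?_⟩
      · rw [heq]; exact hp2
      · rw [segGcd_succ nums sp j hple hj, hseg, heq]
      · intro i hi hsegi
        by_cases hij : i ≤ j
        · obtain ⟨p', hp', hkey'⟩ := hcomp i hij
          obtain ⟨s', hp'2, hs'le, hseg', hmax'⟩ := hs p' hp'
          have his' : i ≤ s' := hmax' i hij hkey'.symm
          have hkq : pyGcd p'.1 x = q.1 := by
            rw [← hsegi, segGcd_succ nums i j hij hj, hkey']
          have := hmax p' hp' hkq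
          have h2 : q.2 = (sp : Int) := by rw [heq]; exact hp2
          rw [hp'2, h2] at this
          omega
        · have hij1 : i = j + 1 := by omega
          subst hij1
          rw [hheadg] at hsegi
          exact absurd hsegi (hnc _ (List.mem_singleton.mpr rfl))
  · -- completeness
    intro i hi
    by_cases hij : i ≤ j
    · obtain ⟨p, hp, hkey⟩ := hcomp i hij
      obtain ⟨q, hq, hqkey⟩ := hkeys p hp
      refine ⟨q, hq, ?_⟩
      rw [hqkey, segGcd_succ nums i j hij hj, hkey]
    · have hij1 : i = j + 1 := by omega
      subst hij1
      exact ⟨_, hheadmem, hheadg.symm⟩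

-- B's best-update fold
theorem foldBest (J : Int) : ∀ (cur : List (Int × Int)) (best : Int),
    (∀ q ∈ cur, 0 ≤ q.2 ∧ q.2 ≤ J) → (best = -1 ∨ 1 ≤ best) →
    ((cur.foldl (bupd J) best = -1 ∨ 1 ≤ cur.foldl (bupd J) best) ∧
     pvIsMin (bOpt (cur.foldl (bupd J) best)) (bOpt best)
       (fun v => ∃ q ∈ cur, q.1 = 1 ∧ v = J - q.2 + 1)) := by
  intro cur
  induction cur with
  | nil =>
      intro best hq hbest
      exact ⟨hbest, IsMin_empty _ _ (by simp)⟩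
  | cons q rest ih =>
      intro best hq hbest
      have hq0 := hq q (List.mem_cons_self)
      have hqr : ∀ p ∈ rest, 0 ≤ p.2 ∧ p.2 ≤ J := fun p hp => hq p (List.mem_cons_of_mem _ hp)
      rw [List.foldl_cons]
      by_cases h1 : q.1 = 1
      · have hlen : 1 ≤ J - q.2 + 1 := by omega
        have hb1 : bupd J best q = if best = -1 ∨ J - q.2 + 1 < best then J - q.2 + 1 else best := by
          simp [bupd, h1]
        have hfact1 : bupd J best q = -1 ∨ 1 ≤ bupd J best q := by
          rw [hb1]; split_ifs with hc
          · exact Or.inr hlen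
          · exact hbest
        have hfact2 : bOpt (bupd J best q) = omin (bOpt best) (J - q.2 + 1) := by
          rw [hb1]
          rcases hbest with hb | hb
          · simp [hb, bOpt, omin]; omega
          · have hne : best ≠ -1 := by omega
            by_cases hc : J - q.2 + 1 < best
            · have : (best = -1 ∨ J - q.2 + 1 < best) := Or.inr hc
              rw [if_pos this]
              simp [bOpt, hne, omin]
              constructor
              · omega
              · omega
            · have : ¬ (best = -1 ∨ J - q.2 + 1 < best) := by tauto
              rw [if_neg this]
              simp [bOpt, hne, omin]
              omega
        obtain ⟨ihs, ihm⟩ := ih (bupd J best q) hqr hfact1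
        refine ⟨ihs, ?_⟩
        have hstep : pvIsMin (bOpt (bupd J best q)) (bOpt best) (fun w => w = J - q.2 + 1) := by
          rw [hfact2]; exact IsMin_omin _ _
        have := IsMin_trans hstep ihm
        refine IsMin_congr ?_ this
        intro v
        constructor
        · rintro (hv | ⟨p, hp, hp1, hpv⟩)
          · exact ⟨q, List.mem_cons_self, h1, hv⟩
          · exact ⟨p, List.mem_cons_of_mem _ hp, hp1, hpv⟩
        · rintro ⟨p, hp, hp1, hpv⟩
          rcases List.mem_cons.mp hp with rfl | hp'
          · exact Or.inl hpv
          · exact Or.inr ⟨p, hp', hp1, hpv⟩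
      · have hb1 : bupd J best q = best := by simp [bupd, h1]
        rw [hb1]
        obtain ⟨ihs, ihm⟩ := ih best hqr hbest
        refine ⟨ihs, IsMin_congr ?_ ihm⟩
        intro v
        constructor
        · rintro ⟨p, hp, hp1, hpv⟩
          exact ⟨p, List.mem_cons_of_mem _ hp, hp1, hpv⟩
        · rintro ⟨p, hp, hp1, hpv⟩
          rcases List.mem_cons.mp hp with rfl | hp'
          · exact absurd hp1 h1
          · exact ⟨p, hp', hp1, hpv⟩

-- B's loop invariant over all processed indices
theorem stB_char (nums : List Int) : ∀ m, m ≤ nums.length →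
    ((m = 0 → stB nums m = ([], -1)) ∧
     (∀ j, m = j + 1 → pvInv nums j (stB nums m).1) ∧
     ((stB nums m).2 = -1 ∨ 1 ≤ (stB nums m).2) ∧
     pvIsMin (bOpt (stB nums m).2) none
       (fun v => ∃ i j, i ≤ j ∧ j < m ∧ segGcd nums i j = 1 ∧ v = (j : Int) - i + 1)) := by
  intro m
  induction m with
  | zero =>
      intro _
      refine ⟨fun _ => rfl, by omega, Or.inl rfl, ?_⟩
      have hb : bOpt (stB nums 0).2 = none := by simp [stB, bOpt]
      rw [hb]
      refine IsMin_empty _ _ ?_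
      rintro v ⟨i, j, _, hj, _⟩
      omega
  | succ m ih =>
      intro hm1
      obtain ⟨ih0, ihInv, ihb, ihm⟩ := ih (by omega)
      have hunf : stB nums (m + 1) = bodyB nums (stB nums m) m := by
        rw [stB, List.range_succ, List.foldl_append, List.foldl_cons, List.foldl_nil]
        rfl
      set st := stB nums m with hst
      have hmn : m < nums.length := by omega
      -- the gcd list after processing index m satisfies the invariant
      have hInvCur : pvInv nums m
          (st.1.foldl (bstep (nums.getD m 0)) [(pyGcd (nums.getD m 0) (nums.getD m 0), (m : Int))]) := by
        cases m with
        | zero =>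
            rw [ih0 rfl]
            simpa using pvInv_zero nums (by omega)
        | succ j =>
            exact pvInv_step nums j st.1 (by omega) (ihInv j rfl)
      set cur := st.1.foldl (bstep (nums.getD m 0)) [(pyGcd (nums.getD m 0) (nums.getD m 0), (m : Int))]
        with hcur
      have hbounds : ∀ q ∈ cur, 0 ≤ q.2 ∧ q.2 ≤ (m : Int) := by
        intro q hq
        obtain ⟨sq, hq2, hqle, _, _⟩ := hInvCur.1 q hq
        rw [hq2]
        constructor
        · positivity
        · exact_mod_cast hqle
      obtain ⟨hb', hmin'⟩ := foldBest (m : Int) cur st.2 hbounds ihb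
      have hnew : stB nums (m + 1) = (cur, cur.foldl (bupd (m : Int)) st.2) := by
        rw [hunf]
        rfl
      refine ⟨by omega, ?_, ?_, ?_⟩
      · intro j hj
        have hjm : j = m := by omega
        subst hjm
        rw [hnew]
        exact hInvCur
      · rw [hnew]
        exact hb'
      · rw [hnew]
        have hcomb := IsMin_trans ihm hmin'
        refine IsMin_subsume hcomb ?_ ?_
        · rintro v (⟨i, j, hij, hjm, hseg, rfl⟩ | ⟨q, hq, hq1, rfl⟩)
          · exact ⟨i, j, hij, by omega, hseg, rfl⟩
          · obtain ⟨sq, hq2, hqle, hqseg, _⟩ := hInvCur.1 q hq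
            refine ⟨sq, m, hqle, by omega, ?_, by rw [hq2]⟩
            rw [hqseg, hq1]
        · rintro v ⟨i, j, hij, hjm, hseg, rfl⟩
          by_cases hjm' : j < m
          · exact ⟨(j : Int) - i + 1, Or.inl ⟨i, j, hij, hjm', hseg, rfl⟩, le_refl _⟩
          · have : j = m := by omega
            subst this
            obtain ⟨q, hq, hqkey⟩ := hInvCur.2.1 i hij
            obtain ⟨sq, hq2, hqle, hqseg, hqmax⟩ := hInvCur.1 q hq
            have hisq : i ≤ sq := hqmax i hij hqkey.symm
            refine ⟨(j : Int) - q.2 + 1, Or.inr ⟨q, hq, by rw [hqkey]; exact hseg, rfl⟩, ?_⟩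
            rw [hq2]
            have : (i : Int) ≤ (sq : Int) := by exact_mod_cast hisq
            omega

-- ===== VERDICT (by name: the statement is the Claim_ definition above) =====
theorem minOperations2_spec : Claim_equal_minOperations2 := by
  unfold Claim_equal_minOperations2
  intro nums _
  unfold Spec_minOperations2
  by_cases hc : ((PySem.Dict.counter nums).getD 1 0 > 0)
  · -- some element equals 1: both take the counting branch
    have hcB : ((PySem.List.count nums 1 : Int) > 0) := by
      rw [PySem.Dict.getD_counter] at hc
      rw [PySem.List.count_eq]
      exact hc
    simp only [minOperations2, minOperations2_alt]
    rw [if_pos hc, if_pos hcB, PySem.Dict.getD_counter, PySem.List.count_eq]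
  · have hcB : ¬ ((PySem.List.count nums 1 : Int) > 0) := by
      rw [PySem.Dict.getD_counter] at hc
      rw [PySem.List.count_eq]
      exact hc
    rw [portA_eq nums hc, portB_eq nums hcB]
    have hA := ansA_char nums nums.length (le_refl _)
    obtain ⟨-, -, hBb, hBm⟩ := stB_char nums nums.length (le_refl _)
    by_cases hbn : (stB nums nums.length).2 = -1
    · -- no subarray has gcd 1: both return -1
      have hnone : bOpt (stB nums nums.length).2 = none := by simp [bOpt, hbn]
      rw [hnone] at hBm
      have hAnone : ansA nums = none := by
        rcases hA.1 with h | ⟨v, hv, hr⟩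
        · exact h
        · obtain ⟨i, j, hi, hij, hj, hseg, rfl⟩ := hv
          obtain ⟨bb, hbb, -⟩ := hBm.2.1 ((j : Int) - i + 1) ⟨i, j, hij, hj, hseg, rfl⟩
          exact absurd hbb (by simp)
      rw [hAnone]
      simp [hbn]
    · -- a best length b exists: A returns b + n - 2
      have hsome : bOpt (stB nums nums.length).2 = some ((stB nums nums.length).2) := by
        simp [bOpt, hbn]
      rw [hsome] at hBm
      set b := (stB nums nums.length).2 with hbdef
      have hPBb : ∃ i j, i ≤ j ∧ j < nums.length ∧ segGcd nums i j = 1 ∧ b = (j : Int) - i + 1 := by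
        rcases hBm.1 with h | ⟨v, hv, hr⟩
        · exact absurd h (by simp)
        · injection hr with h'
          rw [h']
          exact hv
      obtain ⟨i0, j0, hij0, hj0, hseg0, hbval⟩ := hPBb
      have hi0n : i0 < nums.length := by omega
      have hcost0 : b + (nums.length : Int) - 2 = (j0 : Int) - i0 + nums.length - 1 := by
        rw [hbval]; ring
      obtain ⟨a0, ha0, hale⟩ := hA.2.1 (b + (nums.length : Int) - 2)
        ⟨i0, j0, hi0n, hij0, hj0, hseg0, hcost0⟩
      have hage : b + (nums.length : Int) - 2 ≤ a0 := by
        rcases hA.1 with h | ⟨v, hv, hr⟩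
        · rw [h] at ha0; exact absurd ha0 (by simp)
        · rw [hr] at ha0
          injection ha0 with hva
          obtain ⟨i1, j1, hi1, hij1, hj1, hseg1, hva1⟩ := hv
          obtain ⟨c, hcb, hcle⟩ := hBm.2.1 ((j1 : Int) - i1 + 1) ⟨i1, j1, hij1, hj1, hseg1, rfl⟩
          injection hcb with hcb'
          rw [hva] at hva1
          rw [← hcb'] at hcle
          omega
      have ha0val : a0 = b + (nums.length : Int) - 2 := le_antisymm hale hage
      have hae : ansA nums = List.foldl (bodyA nums) none (List.range nums.length) := rfl
      rw [hae, ha0, if_pos hbn]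
      simp [ha0val]
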